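-- pv_equiv track=rewrite | github.com/gamersover/Chinese_company_algorithm_test | 互联网公司笔试题/未知_按二进制顺序替换字符.py | f
-- ===== SOURCE A (Python) =====
-- def f(s, raw, repla):
--     if len(s) < 1:
--         return [""]
--
--     if s[0] == raw:
--         return [s[0] + i for i in f(s[1:], raw, repla)] + \
--             [repla + i for i in f(s[1:], raw, repla)]
--     else:
--         return [s[0] + i for i in f(s[1:], raw, repla)]
-- ===== SOURCE B (Python) =====
-- def f(s, raw, repla):
--     # Single right-to-left pass: the suffix result is built once and reused
--     # for both the keep- and replace-branch (A recomputes it recursively twice).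
--     acc = [""]
--     for c in reversed(s):
--         if c == raw:
--             acc = [c + t for t in acc] + [repla + t for t in acc]
--         else:
--             acc = [c + t for t in acc]
--     return acc
-- ===== Notes on version B (the rewrite author's own statement) =====
-- stated objective: faster
-- what changed: Replaces A's recursion, which calls f(s[1:]) twice in the match branch, by a single right-to-left fold that builds each suffix's result list exactly once.
import Mathlib
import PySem

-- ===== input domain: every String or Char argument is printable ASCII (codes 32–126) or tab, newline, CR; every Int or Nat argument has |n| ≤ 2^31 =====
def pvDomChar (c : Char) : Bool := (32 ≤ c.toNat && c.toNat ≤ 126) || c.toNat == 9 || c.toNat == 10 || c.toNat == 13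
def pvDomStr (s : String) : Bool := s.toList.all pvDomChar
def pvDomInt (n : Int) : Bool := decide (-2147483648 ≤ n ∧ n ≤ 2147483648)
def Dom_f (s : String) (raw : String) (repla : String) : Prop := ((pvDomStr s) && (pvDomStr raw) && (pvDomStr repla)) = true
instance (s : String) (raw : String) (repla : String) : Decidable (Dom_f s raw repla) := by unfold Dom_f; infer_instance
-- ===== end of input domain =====

-- B replaces A's duplicated recursive calls (f(s[1:]) computed twice on a match)
-- by one right-to-left fold that builds each suffix result exactly once: faster.

-- ===== PORT A =====
-- A's recursion over the characters of s; results carried as List Char,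
-- Python string concatenation `x + i` is List.append on the character lists.
def fRecA (s : List Char) (rawL : List Char) (replaL : List Char) : List (List Char) :=
  match s with
  | [] => [[]]
  | c :: rest =>
    if [c] = rawL then
      -- the two comprehensions, each with its OWN recursive call, as in A
      ((fRecA rest rawL replaL).map (fun i => [c] ++ i)) ++
      ((fRecA rest rawL replaL).map (fun i => replaL ++ i))
    else
      (fRecA rest rawL replaL).map (fun i => [c] ++ i)

def f (s : String) (raw : String) (repla : String) : List String :=
  (fRecA s.toList raw.toList repla.toList).map String.mk

-- ===== PORT B =====
-- one fold, right-to-left: each suffix's result list is built once and reused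
def fStepB (rawL : List Char) (replaL : List Char) (c : Char) (acc : List (List Char)) :
    List (List Char) :=
  if [c] = rawL then
    (acc.map (fun t => c :: t)) ++ (acc.map (fun t => replaL ++ t))
  else
    acc.map (fun t => c :: t)

def f_alt (s : String) (raw : String) (repla : String) : List String :=
  (s.toList.foldr (fStepB raw.toList repla.toList) [[]]).map String.mk

-- ===== PRECONDITION & SPEC =====
def Spec_f (s : String) (raw : String) (repla : String) (out : List String) : Prop := out = f_alt s raw repla
instance (s : String) (raw : String) (repla : String) (out : List String) : Decidable (Spec_f s raw repla out) := by unfold Spec_f; infer_instance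

-- ===== CLAIM (what is proved, stated in full; the proofs are below) =====
def Claim_equal_f : Prop := ∀ (s : String) (raw : String) (repla : String), Dom_f s raw repla → Spec_f s raw repla (f s raw repla)

-- ===== LEMMAS AND PROOFS =====
theorem fRecA_eq_foldr (s rawL replaL : List Char) :
    fRecA s rawL replaL = s.foldr (fStepB rawL replaL) [[]] := by
  induction s with
  | nil => rfl
  | cons c rest ih =>
    simp only [fRecA, List.foldr, fStepB, ih]
    split <;> rfl

-- ===== VERDICT (by name: the statement is the Claim_ definition above) =====
theorem f_spec : Claim_equal_f := by
  intro s raw repla _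
  unfold Spec_f f f_alt
  rw [fRecA_eq_foldr]
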